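-- pv_equiv track=rewrite | github.com/pmallappa/paipy | skills/agents/tools/ComposeAgent.py | generate_agent_color
-- ===== SOURCE A (Python) =====
-- AGENT_COLOR_PALETTE = [
--     "#FF6B35",  # Coral Orange
--     "#4ECDC4",  # Teal
--     "#9B59B6",  # Purple
--     "#2ECC71",  # Emerald
--     "#E74C3C",  # Red
--     "#3498DB",  # Blue
--     "#F39C12",  # Orange
--     "#1ABC9C",  # Turquoise
--     "#E91E63",  # Pink
--     "#00BCD4",  # Cyan
--     "#8BC34A",  # Light Green
--     "#FF5722",  # Deep Orange
--     "#673AB7",  # Deep Purple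
--     "#009688",  # Teal Dark
--     "#FFC107",  # Amber
-- ]
--
-- def generate_agent_color(trait_keys: list[str]) -> str:
--     """Generate a unique color based on trait combination (consistent hash)."""
--     sorted_traits = ",".join(sorted(trait_keys))
--     hash_val = 0
--     for ch in sorted_traits:
--         hash_val = ((hash_val << 5) - hash_val) + ord(ch)
--         hash_val &= 0xFFFFFFFF  # 32-bit
--     # Convert to signed 32-bit for parity with JS
--     if hash_val >= 0x80000000:
--         hash_val -= 0x100000000
--     index = abs(hash_val) % len(AGENT_COLOR_PALETTE)
--     return AGENT_COLOR_PALETTE[index]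
-- ===== SOURCE B (Python) =====
-- AGENT_COLOR_PALETTE = [
--     "#FF6B35", "#4ECDC4", "#9B59B6", "#2ECC71", "#E74C3C",
--     "#3498DB", "#F39C12", "#1ABC9C", "#E91E63", "#00BCD4",
--     "#8BC34A", "#FF5722", "#673AB7", "#009688", "#FFC107",
-- ]
--
-- def generate_agent_color(trait_keys: list[str]) -> str:
--     """Generate a unique color based on trait combination (consistent hash)."""
--     s = ",".join(sorted(trait_keys))
--     n = len(s)
--     M = 2 ** 32
--     # closed-form polynomial hash: sum of ord(c_i) * 31^(n-1-i) taken mod 2^32,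
--     # equal to the Horner/shift loop because mod 2^32 is a ring homomorphism
--     pows = [1]
--     for _ in range(n - 1):
--         pows.append(pows[-1] * 31 % M)
--     hash_val = sum(ord(c) * pows[n - 1 - i] for i, c in enumerate(s)) % M
--     if hash_val >= 0x80000000:
--         hash_val -= 0x100000000
--     return AGENT_COLOR_PALETTE[abs(hash_val) % len(AGENT_COLOR_PALETTE)]
-- ===== Notes on version B (the rewrite author's own statement) =====
-- stated objective: alternative
-- what changed: Replaces the per-character Horner shift-and-mask loop with the closed-form polynomial hash sum(ord(c_i)*31^(n-1-i)) mod 2^32, computed from a precomputed power table and one summation, keeping the sorted-join construction and signed-32-bit/abs/modulo tail verbatim.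
import Mathlib
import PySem

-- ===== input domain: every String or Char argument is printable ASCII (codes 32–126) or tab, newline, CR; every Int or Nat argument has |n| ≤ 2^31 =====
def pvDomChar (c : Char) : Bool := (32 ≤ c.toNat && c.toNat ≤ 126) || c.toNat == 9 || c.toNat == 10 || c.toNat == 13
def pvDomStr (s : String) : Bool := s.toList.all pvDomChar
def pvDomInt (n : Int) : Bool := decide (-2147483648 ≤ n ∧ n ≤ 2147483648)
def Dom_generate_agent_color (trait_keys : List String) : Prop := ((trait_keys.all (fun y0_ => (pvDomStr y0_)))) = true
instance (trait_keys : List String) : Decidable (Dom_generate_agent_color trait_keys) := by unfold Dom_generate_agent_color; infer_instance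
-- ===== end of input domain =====

-- B replaces A's per-character Horner shift-and-mask loop by the closed-form
-- polynomial hash (sum of ord(c_i)*31^(n-1-i) mod 2^32); same sorted-join and
-- same signed-32-bit/abs/modulo tail; objective: alternative (same cost).

-- ===== PORT A =====
def pvPalette : List String :=
  ["#FF6B35", "#4ECDC4", "#9B59B6", "#2ECC71", "#E74C3C",
   "#3498DB", "#F39C12", "#1ABC9C", "#E91E63", "#00BCD4",
   "#8BC34A", "#FF5722", "#673AB7", "#009688", "#FFC107"]

def generate_agent_color (trait_keys : List String) : String :=
  let sorted_traits : String := PySem.Str.join "," (PySem.List.sorted trait_keys (fun x => x) false)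
  -- the loop: hash_val = ((hash_val << 5) - hash_val) + ord(ch); hash_val &= 0xFFFFFFFF
  let hash_val : Nat :=
    sorted_traits.toList.foldl (fun h ch => ((h <<< 5) - h + ch.toNat) &&& 0xFFFFFFFF) 0
  let hv : Int := if (hash_val : Int) ≥ 0x80000000 then (hash_val : Int) - 0x100000000 else (hash_val : Int)
  let index : Nat := hv.natAbs % pvPalette.length
  pvPalette.getD index ""   -- index < 15, so in-range like Python's palette[index]

-- ===== PORT B =====
def generate_agent_color_alt (trait_keys : List String) : String :=
  let s : String := PySem.Str.join "," (PySem.List.sorted trait_keys (fun x => x) false)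
  let n : Nat := s.toList.length
  -- pows = [1]; for _ in range(n - 1): pows.append(pows[-1] * 31 % M)
  let pows : List Nat :=
    (List.range (n - 1)).foldl (fun acc _ => acc ++ [acc.getLastD 1 * 31 % 4294967296]) [1]
  -- hash_val = sum(ord(c) * pows[n - 1 - i] for i, c in enumerate(s)) % M
  -- pows[n-1-i] is always in range, so getD's default is never used
  let hash_val : Nat :=
    ((s.toList.zipIdx.map (fun p => p.1.toNat * pows.getD (n - 1 - p.2) 0)).sum) % 4294967296
  let hv : Int := if (hash_val : Int) ≥ 0x80000000 then (hash_val : Int) - 0x100000000 else (hash_val : Int)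
  pvPalette.getD (hv.natAbs % pvPalette.length) ""

-- ===== PRECONDITION & SPEC =====
def Spec_generate_agent_color (trait_keys : List String) (out : String) : Prop := out = generate_agent_color_alt trait_keys
instance (trait_keys : List String) (out : String) : Decidable (Spec_generate_agent_color trait_keys out) := by unfold Spec_generate_agent_color; infer_instance

-- ===== CLAIM (what is proved, stated in full; the proofs are below) =====
def Claim_equal_generate_agent_color : Prop := ∀ (trait_keys : List String), Dom_generate_agent_color trait_keys → Spec_generate_agent_color trait_keys (generate_agent_color trait_keys)

-- ===== LEMMAS AND PROOFS =====

-- the exact polynomial both hashes compute (mod 2^32)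
def pvPoly : List Char → Nat
  | [] => 0
  | c :: t => c.toNat * 31 ^ t.length + pvPoly t

theorem pv_and_mask (x : Nat) : x &&& 0xFFFFFFFF = x % 4294967296 := by
  have := Nat.and_two_pow_sub_one_eq_mod x 32
  simpa using this

-- A's Horner fold equals (h·31^len + poly) mod 2^32
theorem pv_foldA (s : List Char) : ∀ h : Nat, h < 4294967296 →
    s.foldl (fun h ch => ((h <<< 5) - h + ch.toNat) &&& 0xFFFFFFFF) h
      = (h * 31 ^ s.length + pvPoly s) % 4294967296 := by
  induction s with
  | nil => intro h hh; simp [pvPoly, Nat.mod_eq_of_lt hh]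
  | cons c t ih =>
    intro h hh
    have hstep : ((h <<< 5) - h + c.toNat) &&& 0xFFFFFFFF
        = (h * 31 + c.toNat) % 4294967296 := by
      rw [pv_and_mask]; congr 1; rw [Nat.shiftLeft_eq]; omega
    have hrec := ih ((h * 31 + c.toNat) % 4294967296) (Nat.mod_lt _ (by norm_num))
    simp only [List.foldl_cons, hstep, hrec, pvPoly, List.length_cons]
    have h1 : (h * 31 + c.toNat) % 4294967296 * 31 ^ t.length + pvPoly t
        ≡ (h * 31 + c.toNat) * 31 ^ t.length + pvPoly t [MOD 4294967296] :=
      Nat.ModEq.add_right _ (Nat.ModEq.mul_right _ (Nat.mod_modEq _ _))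
    calc ((h * 31 + c.toNat) % 4294967296 * 31 ^ t.length + pvPoly t) % 4294967296
        = ((h * 31 + c.toNat) * 31 ^ t.length + pvPoly t) % 4294967296 := h1
      _ = (h * 31 ^ (t.length + 1) + (c.toNat * 31 ^ t.length + pvPoly t)) % 4294967296 := by
          ring_nf

-- B's modular-power sum equals poly mod 2^32 (generalised over the start index)
theorem pv_sumB (n : Nat) : ∀ (t : List Char) (k : Nat), n = k + t.length →
    ((t.zipIdx k).map (fun p => p.1.toNat * (31 ^ (n - 1 - p.2) % 4294967296))).sum
      ≡ pvPoly t [MOD 4294967296] := by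
  intro t
  induction t with
  | nil => intro k _; simp [pvPoly, Nat.ModEq.refl]
  | cons c t ih =>
    intro k hn
    have hexp : n - 1 - k = t.length := by
      simp [List.length_cons] at hn; omega
    have hhead : c.toNat * (31 ^ (n - 1 - k) % 4294967296)
        ≡ c.toNat * 31 ^ t.length [MOD 4294967296] := by
      rw [hexp]; exact Nat.ModEq.mul_left _ (Nat.mod_modEq _ _)
    have htail := ih (k + 1) (by simp [List.length_cons] at hn ⊢; omega)
    simpa [List.zipIdx_cons, pvPoly] using hhead.add htail

-- the power table built by B's loop is exactly [31^0 % M, …, 31^m % M]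
theorem pv_table (m : Nat) :
    (List.range m).foldl (fun acc _ => acc ++ [acc.getLastD 1 * 31 % 4294967296]) [1]
      = (List.range (m + 1)).map (fun j => 31 ^ j % 4294967296) := by
  induction m with
  | zero => simp
  | succ m ih =>
    rw [List.range_succ, List.foldl_append, ih]
    have hlast : ((List.range (m + 1)).map (fun j => 31 ^ j % 4294967296)).getLastD 1
        = 31 ^ m % 4294967296 := by
      rw [List.range_succ, List.map_append]
      simp
    rw [List.foldl_cons, List.foldl_nil, hlast, List.range_succ (n := m + 1), List.map_append]
    simp [Nat.pow_succ, Nat.mod_mul_mod]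

theorem pv_table_getD (m j : Nat) (hj : j ≤ m) :
    ((List.range m).foldl (fun acc _ => acc ++ [acc.getLastD 1 * 31 % 4294967296]) [1]).getD j 0
      = 31 ^ j % 4294967296 := by
  rw [pv_table]
  rw [List.getD_eq_getElem?_getD, List.getElem?_map, List.getElem?_range (by omega)]
  simp

-- the two hash values are equal outright
theorem pv_hash_eq (s : List Char) :
    s.foldl (fun h ch => ((h <<< 5) - h + ch.toNat) &&& 0xFFFFFFFF) 0
      = ((s.zipIdx.map (fun p => p.1.toNat *
            ((List.range (s.length - 1)).foldl
              (fun acc _ => acc ++ [acc.getLastD 1 * 31 % 4294967296]) [1]).getD (s.length - 1 - p.2) 0)).sum)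
          % 4294967296 := by
  have hmap : s.zipIdx.map (fun p => p.1.toNat *
        ((List.range (s.length - 1)).foldl
          (fun acc _ => acc ++ [acc.getLastD 1 * 31 % 4294967296]) [1]).getD (s.length - 1 - p.2) 0)
      = s.zipIdx.map (fun p => p.1.toNat * (31 ^ (s.length - 1 - p.2) % 4294967296)) := by
    apply List.map_congr_left
    intro p hp
    have := List.mem_zipIdx hp
    rw [pv_table_getD _ _ (by omega)]
  rw [hmap, pv_foldA s 0 (by norm_num)]
  have hb := pv_sumB s.length s 0 (by simp)
  simpa [Nat.ModEq] using hb.symm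

-- ===== VERDICT (by name: the statement is the Claim_ definition above) =====
theorem generate_agent_color_spec : Claim_equal_generate_agent_color := by
  intro trait_keys _
  unfold Spec_generate_agent_color generate_agent_color generate_agent_color_alt
  simp only [pv_hash_eq]
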